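-- pv_equiv track=rewrite | github.com/UgaChavis/AutostopCRM-V1 | src/minimal_kanban/models.py | normalize_ai_autofill_log
-- ===== SOURCE A (Python) =====
-- CARD_AI_AUTOFILL_LOG_LIMIT = 24
--
-- def normalize_text(value, *, default: str = "", limit: int | None = None) -> str:
--     text = str(value or "").strip()
--     if not text:
--         text = default
--     if limit is not None:
--         text = text[:limit]
--     return text
--
-- def normalize_ai_autofill_log(value) -> list[dict[str, str]]:
--     if not isinstance(value, list):
--         return []
--     items: list[dict[str, str]] = []
--     for entry in value:
--         if not isinstance(entry, dict):
--             continue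
--         level = normalize_text(entry.get("level"), default="INFO", limit=8).upper()
--         if level not in {"INFO", "RUN", "WAIT", "DONE", "WARN"}:
--             level = "INFO"
--         message = normalize_text(entry.get("message"), default="", limit=240)
--         timestamp = normalize_text(entry.get("timestamp"), default="", limit=64)
--         task_id = normalize_text(entry.get("task_id"), default="", limit=64)
--         if not message:
--             continue
--         items.append(
--             {
--                 "level": level,
--                 "message": message,
--                 "timestamp": timestamp,
--                 "task_id": task_id,
--             }
--         )
--     if len(items) > CARD_AI_AUTOFILL_LOG_LIMIT:
--         items = items[-CARD_AI_AUTOFILL_LOG_LIMIT:]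
--     return items
-- ===== SOURCE B (Python) =====
-- CARD_AI_AUTOFILL_LOG_LIMIT = 24
--
-- def normalize_text(value, *, default: str = "", limit: int | None = None) -> str:
--     text = str(value or "").strip()
--     if not text:
--         text = default
--     if limit is not None:
--         text = text[:limit]
--     return text
--
-- def _normalize_entry(entry):
--     if not isinstance(entry, dict):
--         return None
--     level = normalize_text(entry.get("level"), default="INFO", limit=8).upper()
--     if level not in {"INFO", "RUN", "WAIT", "DONE", "WARN"}:
--         level = "INFO"
--     message = normalize_text(entry.get("message"), default="", limit=240)
--     if not message:
--         return None
--     return {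
--         "level": level,
--         "message": message,
--         "timestamp": normalize_text(entry.get("timestamp"), default="", limit=64),
--         "task_id": normalize_text(entry.get("task_id"), default="", limit=64),
--     }
--
-- def normalize_ai_autofill_log(value) -> list[dict[str, str]]:
--     if not isinstance(value, list):
--         return []
--     buf: list[dict[str, str]] = []
--     for entry in reversed(value):
--         if len(buf) == CARD_AI_AUTOFILL_LOG_LIMIT:
--             break
--         item = _normalize_entry(entry)
--         if item is not None:
--             buf.append(item)
--     buf.reverse()
--     return buf
-- ===== Notes on version B (the rewrite author's own statement) =====
-- stated objective: alternative
-- what changed: B walks the list in reverse collecting at most 24 accepted entries into a bounded buffer with an early break, then reverses it, instead of normalizing every entry into a full list and slicing off its last 24; same cost in the measured cases.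
import Mathlib
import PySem

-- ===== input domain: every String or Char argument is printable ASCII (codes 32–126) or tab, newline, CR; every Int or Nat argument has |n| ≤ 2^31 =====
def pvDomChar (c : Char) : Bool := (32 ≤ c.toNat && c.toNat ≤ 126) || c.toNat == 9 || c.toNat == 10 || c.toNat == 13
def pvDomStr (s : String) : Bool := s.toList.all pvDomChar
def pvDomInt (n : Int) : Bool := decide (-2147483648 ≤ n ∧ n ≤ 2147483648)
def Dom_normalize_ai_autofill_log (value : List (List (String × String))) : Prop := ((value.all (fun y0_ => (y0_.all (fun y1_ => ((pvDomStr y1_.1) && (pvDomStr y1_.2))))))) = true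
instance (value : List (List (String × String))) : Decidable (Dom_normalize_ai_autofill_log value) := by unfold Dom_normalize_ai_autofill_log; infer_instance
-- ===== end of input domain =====

-- B replaces "normalize everything, then keep items[-24:]" by a reverse walk that stops as soon
-- as 24 entries are accepted (bounded buffer, reversed at the end); return values are identical.
-- Under the type convention `value` is always a list of str->str dicts, so the
-- isinstance checks of the Python are identically true and are not ported.

-- ===== PORT A =====
-- shared with B: entry.get(k) — first match in the association list
def nafGet : List (String × String) → String → Option String
  | [], _ => none
  | (k, v) :: rest, key => if k == key then some v else nafGet rest key

-- shared with B: normalize_text(value, default=dflt, limit=lim); `value` is entry.get(k), an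
-- Option String, so `str(value or "")` is `v.getD ""` (str of a str is itself, str(None or "") = "")
def nafText (v : Option String) (dflt : String) (lim : Option Int) : String :=
  let text := PySem.Str.strip (v.getD "")
  let text := if text = "" then dflt else text
  match lim with
  | none => text
  | some l => PySem.Str.slice text none (some l)

-- the body of A's for-loop (continue = return items unchanged)
def nafStep (items : List (List (String × String))) (entry : List (String × String)) :
    List (List (String × String)) :=
  let level0 := PySem.Str.upper (nafText (nafGet entry "level") "INFO" (some 8))
  let level := if level0 ∈ ["INFO", "RUN", "WAIT", "DONE", "WARN"] then level0 else "INFO"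
  let message := nafText (nafGet entry "message") "" (some 240)
  let timestamp := nafText (nafGet entry "timestamp") "" (some 64)
  let task_id := nafText (nafGet entry "task_id") "" (some 64)
  if message = "" then items
  else items ++ [[("level", level), ("message", message), ("timestamp", timestamp), ("task_id", task_id)]]

def normalize_ai_autofill_log (value : List (List (String × String))) : List (List (String × String)) :=
  let items := value.foldl nafStep []
  if items.length > 24 then PySem.List.slice items (some (-24)) none else items

-- ===== PORT B =====
-- _normalize_entry: dict-or-None for one entry
def nafEntry (entry : List (String × String)) : Option (List (String × String)) :=
  let level0 := PySem.Str.upper (nafText (nafGet entry "level") "INFO" (some 8))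
  let level := if level0 ∈ ["INFO", "RUN", "WAIT", "DONE", "WARN"] then level0 else "INFO"
  let message := nafText (nafGet entry "message") "" (some 240)
  if message = "" then none
  else some [("level", level), ("message", message),
             ("timestamp", nafText (nafGet entry "timestamp") "" (some 64)),
             ("task_id", nafText (nafGet entry "task_id") "" (some 64))]

-- the reverse walk with early break at 24 accepted entries
def nafRevLoop : List (List (String × String)) → List (List (String × String)) → List (List (String × String))
  | [], buf => buf
  | entry :: rest, buf =>
    if buf.length = 24 then buf
    else
      match nafEntry entry with
      | some item => nafRevLoop rest (buf ++ [item])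
      | none => nafRevLoop rest buf

def normalize_ai_autofill_log_alt (value : List (List (String × String))) : List (List (String × String)) :=
  (nafRevLoop value.reverse []).reverse

-- ===== PRECONDITION & SPEC =====
def Spec_normalize_ai_autofill_log (value : List (List (String × String))) (out : List (List (String × String))) : Prop := out = normalize_ai_autofill_log_alt value
instance (value : List (List (String × String))) (out : List (List (String × String))) : Decidable (Spec_normalize_ai_autofill_log value out) := by unfold Spec_normalize_ai_autofill_log; infer_instance

-- ===== CLAIM (what is proved, stated in full; the proofs are below) =====
def Claim_equal_normalize_ai_autofill_log : Prop := ∀ (value : List (List (String × String))), Dom_normalize_ai_autofill_log value → Spec_normalize_ai_autofill_log value (normalize_ai_autofill_log value)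

-- ===== LEMMAS AND PROOFS =====

-- A's loop body appends exactly what B's _normalize_entry accepts
lemma nafStep_eq (items : List (List (String × String))) (entry : List (String × String)) :
    nafStep items entry = items ++ (nafEntry entry).toList := by
  simp only [nafStep, nafEntry]
  split <;> simp

lemma foldl_nafStep (value : List (List (String × String)))
    (acc : List (List (String × String))) :
    value.foldl nafStep acc = acc ++ value.filterMap nafEntry := by
  induction value generalizing acc with
  | nil => simp
  | cons e rest ih =>
    simp only [List.foldl_cons, List.filterMap_cons, ih, nafStep_eq]
    cases nafEntry e <;> simp

lemma nafRevLoop_eq (rev : List (List (String × String)))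
    (buf : List (List (String × String))) (h : buf.length ≤ 24) :
    nafRevLoop rev buf = buf ++ (rev.filterMap nafEntry).take (24 - buf.length) := by
  induction rev generalizing buf with
  | nil => simp [nafRevLoop]
  | cons e rest ih =>
    simp only [nafRevLoop, List.filterMap_cons]
    split
    · next hb => simp [hb]
    · next hb =>
      have hlt : buf.length < 24 := lt_of_le_of_ne h hb
      cases hE : nafEntry e with
      | none => exact ih buf h
      | some item =>
        dsimp only
        rw [ih (buf ++ [item]) (by simp; omega)]
        have : 24 - buf.length = (24 - (buf ++ [item]).length) + 1 := by simp; omega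
        simp [this, List.take_succ_cons]

-- reversing, taking a prefix and reversing back is dropping all but the last n elements
lemma reverse_take_reverse {α : Type} (l : List α) (n : Nat) :
    (l.reverse.take n).reverse = l.drop (l.length - n) := by
  rw [List.take_reverse, List.reverse_reverse]

-- ===== VERDICT (by name: the statement is the Claim_ definition above) =====
theorem normalize_ai_autofill_log_spec : Claim_equal_normalize_ai_autofill_log := by
  intro value _
  unfold Spec_normalize_ai_autofill_log normalize_ai_autofill_log normalize_ai_autofill_log_alt
  rw [nafRevLoop_eq _ _ (by simp), List.filterMap_reverse]
  simp only [List.nil_append, List.length_nil, Nat.sub_zero, reverse_take_reverse, foldl_nafStep]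
  set L := value.filterMap nafEntry with hL
  split
  · next h =>
    rw [PySem.List.slice_from_neg_ofNat L 24 (by omega)]
  · next h =>
    have : L.length - 24 = 0 := by omega
    simp [this]
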